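-- pv_equiv track=rewrite | github.com/Cin42720/Don-t-Starve-Together-TR | tools/generate/generate_stageactor_lua.py | build_lua_lines
-- ===== SOURCE A (Python) =====
-- def lua_escape(s):
--     s = s.replace('\\', '\\\\')
--     s = s.replace('"', '\\"')
--     s = s.replace('\n', '\\n')
--     s = s.replace('\t', '\\t')
--     return s
--
-- def build_lua_lines(stageactor_tr):
--     lines = [
--         "-- Don't Starve Together Turkish Translation - StageActor",
--         "-- Auto-generated",
--         "",
--         "STRINGS.STAGEACTOR = STRINGS.STAGEACTOR or {}",
--         "",
--     ]
--
--     # Kategorilere gore grupla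
--     categories = {}
--     for key, value in stageactor_tr.items():
--         if not value:
--             continue
--         parts = key.split('.', 1)
--         cat = parts[0]
--         if cat not in categories:
--             categories[cat] = []
--         categories[cat].append((key, value))
--
--     for cat in sorted(categories.keys()):
--         items = categories[cat]
--         lines.append(f"STRINGS.STAGEACTOR.{cat} = STRINGS.STAGEACTOR.{cat} or {{}}")
--
--         for key, value in items:
--             parts = key.split('.', 1)
--             sub_key = parts[1] if len(parts) > 1 else key
--
--             # Numerik key mi?
--             if sub_key.isdigit():
--                 lines.append(f'STRINGS.STAGEACTOR.{cat}[{sub_key}] = "{lua_escape(value)}"')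
--             else:
--                 lines.append(f'STRINGS.STAGEACTOR.{cat}.{sub_key} = "{lua_escape(value)}"')
--
--         lines.append("")
--
--     return lines
-- ===== SOURCE B (Python) =====
-- def lua_escape(s):
--     s = s.replace('\\', '\\\\')
--     s = s.replace('"', '\\"')
--     s = s.replace('\n', '\\n')
--     s = s.replace('\t', '\\t')
--     return s
--
-- def cat_of(key):
--     return key.split('.', 1)[0]
--
-- def header_line(cat):
--     return f"STRINGS.STAGEACTOR.{cat} = STRINGS.STAGEACTOR.{cat} or {{}}"
--
-- def entry_line(cat, key, value):
--     parts = key.split('.', 1)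
--     sub_key = parts[1] if len(parts) > 1 else key
--     if sub_key.isdigit():
--         return f'STRINGS.STAGEACTOR.{cat}[{sub_key}] = "{lua_escape(value)}"'
--     return f'STRINGS.STAGEACTOR.{cat}.{sub_key} = "{lua_escape(value)}"'
--
-- def build_lua_lines(stageactor_tr):
--     entries = [(cat_of(k), k, v) for k, v in stageactor_tr.items() if v]
--     lines = [
--         "-- Don't Starve Together Turkish Translation - StageActor",
--         "-- Auto-generated",
--         "",
--         "STRINGS.STAGEACTOR = STRINGS.STAGEACTOR or {}",
--         "",
--     ]
--     for cat in sorted({c for c, _, _ in entries}):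
--         lines.append(header_line(cat))
--         for c, key, value in entries:
--             if c == cat:
--                 lines.append(entry_line(cat, key, value))
--         lines.append("")
--     return lines
-- ===== Notes on version B (the rewrite author's own statement) =====
-- stated objective: simpler
-- what changed: Replaces A's category-bucket dict (build buckets, then iterate sorted keys) with a sorted set of category prefixes and one filtered scan of the precomputed (category, key, value) entry list per category, factoring the line formatting into small helpers; this trades A's O(n) grouping for an O(n*k) rescan and is not faster.
import Mathlib
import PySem

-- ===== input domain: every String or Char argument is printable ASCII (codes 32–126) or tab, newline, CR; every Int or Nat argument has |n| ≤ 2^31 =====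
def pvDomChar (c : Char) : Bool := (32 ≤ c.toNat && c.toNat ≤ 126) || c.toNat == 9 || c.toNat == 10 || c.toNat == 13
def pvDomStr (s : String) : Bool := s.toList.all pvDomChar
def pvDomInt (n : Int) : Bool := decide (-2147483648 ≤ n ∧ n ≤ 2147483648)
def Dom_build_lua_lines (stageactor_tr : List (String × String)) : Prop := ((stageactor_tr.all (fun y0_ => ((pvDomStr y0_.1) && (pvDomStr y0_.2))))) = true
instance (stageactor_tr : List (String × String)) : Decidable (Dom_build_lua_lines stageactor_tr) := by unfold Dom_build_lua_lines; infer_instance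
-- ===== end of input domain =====

-- B replaces A's category-bucket dict with a sorted set of category prefixes plus one
-- filtered scan of the entry list per category (objective: a simpler decomposition, not speed).

-- ===== PORT A =====
def luaEscape (s : String) : String :=
  let s1 := PySem.Str.replace s "\\" "\\\\"
  let s2 := PySem.Str.replace s1 "\"" "\\\""
  let s3 := PySem.Str.replace s2 "\n" "\\n"
  let s4 := PySem.Str.replace s3 "\t" "\\t"
  s4

-- the body of A's grouping loop: skip falsy values; ensure the bucket exists; append to it
def groupAdd (categories : PySem.Dict String (List (String × String)))
    (kv : String × String) : PySem.Dict String (List (String × String)) :=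
  if kv.2 == "" then categories
  else
    let parts := (PySem.Str.splitMax? kv.1 "." 1).getD []
    let cat := parts.headD ""
    let categories := if categories.contains cat then categories else categories.insert cat []
    categories.insert cat (categories.getD cat [] ++ [kv])

def build_lua_lines (stageactor_tr : List (String × String)) : List String :=
  let lines : List String :=
    ["-- Don't Starve Together Turkish Translation - StageActor",
     "-- Auto-generated",
     "",
     "STRINGS.STAGEACTOR = STRINGS.STAGEACTOR or {}",
     ""]
  let categories := (PySem.Dict.ofList stageactor_tr).items.foldl groupAdd PySem.Dict.empty
  (PySem.List.sorted categories.keys (fun k => k) false).foldl (fun lines cat =>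
    let items := categories.getD cat []
    let lines := lines ++ ["STRINGS.STAGEACTOR." ++ cat ++ " = STRINGS.STAGEACTOR." ++ cat ++ " or {}"]
    let lines := items.foldl (fun lines kv =>
      let parts := (PySem.Str.splitMax? kv.1 "." 1).getD []
      let sub_key := if parts.length > 1 then parts[1]! else kv.1
      if PySem.Str.strIsdigit sub_key then
        lines ++ ["STRINGS.STAGEACTOR." ++ cat ++ "[" ++ sub_key ++ "] = \"" ++ luaEscape kv.2 ++ "\""]
      else
        lines ++ ["STRINGS.STAGEACTOR." ++ cat ++ "." ++ sub_key ++ " = \"" ++ luaEscape kv.2 ++ "\""]) lines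
    lines ++ [""]) lines

-- ===== PORT B =====
def catOf (key : String) : String :=
  ((PySem.Str.splitMax? key "." 1).getD []).headD ""

def headerLine (cat : String) : String :=
  "STRINGS.STAGEACTOR." ++ cat ++ " = STRINGS.STAGEACTOR." ++ cat ++ " or {}"

def entryLine (cat key value : String) : String :=
  let parts := (PySem.Str.splitMax? key "." 1).getD []
  let sub_key := if parts.length > 1 then parts[1]! else key
  if PySem.Str.strIsdigit sub_key then
    "STRINGS.STAGEACTOR." ++ cat ++ "[" ++ sub_key ++ "] = \"" ++ luaEscape value ++ "\""
  else
    "STRINGS.STAGEACTOR." ++ cat ++ "." ++ sub_key ++ " = \"" ++ luaEscape value ++ "\""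

def build_lua_lines_alt (stageactor_tr : List (String × String)) : List String :=
  let entries := ((PySem.Dict.ofList stageactor_tr).items.filter (fun kv => !(kv.2 == ""))).map
    (fun kv => (catOf kv.1, kv.1, kv.2))
  (PySem.List.sorted (PySem.Set.ofList (entries.map (fun e => e.1))) (fun c => c) false).foldl
    (fun lines cat =>
      let lines := lines ++ [headerLine cat]
      let lines := entries.foldl (fun lines e =>
        if e.1 == cat then lines ++ [entryLine cat e.2.1 e.2.2] else lines) lines
      lines ++ [""])
    ["-- Don't Starve Together Turkish Translation - StageActor",
     "-- Auto-generated",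
     "",
     "STRINGS.STAGEACTOR = STRINGS.STAGEACTOR or {}",
     ""]

-- ===== PRECONDITION & SPEC =====
def Spec_build_lua_lines (stageactor_tr : List (String × String)) (out : List String) : Prop := out = build_lua_lines_alt stageactor_tr
instance (stageactor_tr : List (String × String)) (out : List String) : Decidable (Spec_build_lua_lines stageactor_tr out) := by unfold Spec_build_lua_lines; infer_instance

-- ===== CLAIM (what is proved, stated in full; the proofs are below) =====
def Claim_equal_build_lua_lines : Prop := ∀ (stageactor_tr : List (String × String)), Dom_build_lua_lines stageactor_tr → Spec_build_lua_lines stageactor_tr (build_lua_lines stageactor_tr)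

-- ===== LEMMAS AND PROOFS =====

-- one step of A's grouping loop, seen through getD
theorem getD_groupAdd (d : PySem.Dict String (List (String × String)))
    (kv : String × String) (c : String) :
    (groupAdd d kv).getD c [] =
      if !(kv.2 == "") && (catOf kv.1 == c) then d.getD c [] ++ [kv] else d.getD c [] := by
  by_cases hv : kv.2 = ""
  · simp [groupAdd, hv]
  · have hne : (kv.2 == "") = false := by simp [hv]
    simp only [groupAdd, hne, Bool.false_eq_true, if_false, Bool.not_false, Bool.true_and]
    by_cases hc : catOf kv.1 = c
    · have hcb : (catOf kv.1 == c) = true := by simp [hc]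
      rw [hcb, if_pos rfl]
      rw [show c = ((PySem.Str.splitMax? kv.1 "." 1).getD []).headD "" from hc.symm]
      rw [PySem.Dict.getD_insert_self]
      split
      · rfl
      · rename_i h
        rw [PySem.Dict.getD_insert_self,
            PySem.Dict.getD_of_not_contains d _ (by simpa using h)]
    · have hcb : (catOf kv.1 == c) = false := by simp [hc]
      have hc' : c ≠ ((PySem.Str.splitMax? kv.1 "." 1).getD []).headD "" := by
        intro h; exact hc h.symm
      rw [hcb, if_neg (show ¬(false = true) by simp),
          PySem.Dict.getD_insert_of_ne _ _ _ hc']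
      split
      · rfl
      · rw [PySem.Dict.getD_insert_of_ne _ _ _ hc']

-- one step of A's grouping loop, seen through the key list
theorem mem_keys_groupAdd (d : PySem.Dict String (List (String × String)))
    (kv : String × String) (x : String) :
    x ∈ (groupAdd d kv).keys ↔ ((!(kv.2 == "")) = true ∧ x = catOf kv.1) ∨ x ∈ d.keys := by
  by_cases hv : kv.2 = ""
  · simp [groupAdd, hv]
  · have hne : (kv.2 == "") = false := by simp [hv]
    simp only [groupAdd, hne, Bool.false_eq_true, if_false, Bool.not_false, true_and]
    split <;> simp [PySem.Dict.mem_keys_insert, catOf]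

-- keys stay unique through A's grouping loop
theorem nodup_keys_groupAdd (d : PySem.Dict String (List (String × String)))
    (kv : String × String) (h : d.keys.Nodup) : (groupAdd d kv).keys.Nodup := by
  simp only [groupAdd]
  split
  · exact h
  · refine PySem.Dict.nodup_keys_insert _ _ _ ?_
    split
    · exact h
    · exact PySem.Dict.nodup_keys_insert _ _ _ h

-- the bucket of category c after the whole grouping fold
theorem getD_foldl_groupAdd (l : List (String × String))
    (d : PySem.Dict String (List (String × String))) (c : String) :
    (l.foldl groupAdd d).getD c [] =
      d.getD c [] ++ l.filter (fun kv => !(kv.2 == "") && (catOf kv.1 == c)) := by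
  induction l generalizing d with
  | nil => simp
  | cons kv t ih =>
    rw [List.foldl_cons, ih, getD_groupAdd, List.filter_cons]
    by_cases h : (!(kv.2 == "") && (catOf kv.1 == c)) = true
    · simp [h]
    · simp [h]

-- membership in the key list after the whole grouping fold
theorem mem_keys_foldl_groupAdd (l : List (String × String))
    (d : PySem.Dict String (List (String × String))) (x : String) :
    x ∈ (l.foldl groupAdd d).keys ↔
      x ∈ d.keys ∨ x ∈ (l.filter (fun kv => !(kv.2 == ""))).map (fun kv => catOf kv.1) := by
  induction l generalizing d with
  | nil => simp
  | cons kv t ih =>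
    rw [List.foldl_cons, ih, mem_keys_groupAdd, List.filter_cons]
    by_cases hv : kv.2 = ""
    · simp [hv]
    · simp [hv]
      tauto

theorem nodup_keys_foldl_groupAdd (l : List (String × String))
    (d : PySem.Dict String (List (String × String))) (h : d.keys.Nodup) :
    (l.foldl groupAdd d).keys.Nodup := by
  induction l generalizing d with
  | nil => simpa
  | cons kv t ih => exact ih _ (nodup_keys_groupAdd _ _ h)

-- A's inner loop over one bucket appends exactly B's entry lines
theorem innerA_eq (c : String) (items : List (String × String)) (a : List String) :
    items.foldl (fun lines kv =>
      let parts := (PySem.Str.splitMax? kv.1 "." 1).getD []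
      let sub_key := if parts.length > 1 then parts[1]! else kv.1
      if PySem.Str.strIsdigit sub_key then
        lines ++ ["STRINGS.STAGEACTOR." ++ c ++ "[" ++ sub_key ++ "] = \"" ++ luaEscape kv.2 ++ "\""]
      else
        lines ++ ["STRINGS.STAGEACTOR." ++ c ++ "." ++ sub_key ++ " = \"" ++ luaEscape kv.2 ++ "\""]) a
    = a ++ items.map (fun kv => entryLine c kv.1 kv.2) := by
  calc items.foldl _ a
      = items.foldl (fun lines kv => lines ++ [entryLine c kv.1 kv.2]) a := by
        apply PySem.List.foldl_congr_mem
        intro a' kv _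
        simp only [entryLine]
        split <;> exact (apply_ite (fun s => a' ++ [s]) _ _ _).symm
    _ = a ++ items.map (fun kv => entryLine c kv.1 kv.2) :=
        PySem.List.foldl_append_singleton_eq_map _ _ _

-- B's inner loop is one filtered scan appending entry lines
theorem innerB_eq (c : String) (entries : List (String × String × String)) (a : List String) :
    entries.foldl (fun lines e =>
      if e.1 == c then lines ++ [entryLine c e.2.1 e.2.2] else lines) a
    = a ++ (entries.filter (fun e => e.1 == c)).map (fun e => entryLine c e.2.1 e.2.2) := by
  induction entries generalizing a with
  | nil => simp
  | cons kv t ih =>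
    rw [List.foldl_cons, List.filter_cons]
    by_cases h : (kv.1 == c) = true
    · rw [if_pos h, ih]
      simp [h]
    · rw [if_neg h, ih]
      simp [h]

theorem build_eq (stageactor_tr : List (String × String)) :
    build_lua_lines stageactor_tr = build_lua_lines_alt stageactor_tr := by
  simp only [build_lua_lines, build_lua_lines_alt]
  generalize (PySem.Dict.ofList stageactor_tr).items = l
  have hkeys : PySem.List.sorted (List.foldl groupAdd PySem.Dict.empty l).keys (fun k => k) false
      = PySem.List.sorted
          (PySem.Set.ofList
            (((l.filter (fun kv => !(kv.2 == ""))).map (fun kv => (catOf kv.1, kv.1, kv.2))).map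
              (fun e => e.1)))
          (fun c => c) false := by
    apply PySem.List.sorted_eq_sorted_of_perm _ _ _ (fun a b h => h)
    refine (List.perm_ext_iff_of_nodup
      (nodup_keys_foldl_groupAdd _ _ PySem.Dict.nodup_keys_empty)
      (PySem.Set.nodup_ofList _)).2 ?_
    intro x
    rw [mem_keys_foldl_groupAdd, PySem.Set.mem_ofList, PySem.Dict.keys_empty]
    simp
  rw [hkeys]
  apply PySem.List.foldl_congr_mem
  intro acc c _
  beta_reduce
  rw [getD_foldl_groupAdd, PySem.Dict.getD_empty, List.nil_append, innerA_eq, innerB_eq]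
  simp only [List.filter_map, List.map_map, List.filter_filter, Function.comp]
  have hfil : l.filter (fun kv => !(kv.2 == "") && (catOf kv.1 == c))
      = l.filter (fun kv => (catOf kv.1 == c) && !(kv.2 == "")) := by
    apply List.filter_congr
    intro kv _
    rw [Bool.and_comm]
  rw [hfil]
  simp [headerLine]

-- ===== VERDICT (by name: the statement is the Claim_ definition above) =====
theorem build_lua_lines_spec : Claim_equal_build_lua_lines := by
  intro tr _
  exact build_eq tr
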